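-- pv_equiv track=rewrite | github.com/letstart900/nir | ir_hits.py | findInOutEdges
-- ===== SOURCE A (Python) =====
-- def findInOutEdges(adjMat):
--   edgeDict = {};
--
--   #find incoming and outgoing edges of each node
--   for i in range(len(adjMat)):
--     incoming = []
--     outgoing = []
--     for j in range(len(adjMat)):
--       if adjMat[i][j] == 1:
--         outgoing.append(j)
--       if adjMat[j][i] == 1:
--         incoming.append(j)
--     edgeDict[i] = [incoming, outgoing]
--
--   return edgeDict
-- ===== SOURCE B (Python) =====
-- def findInOutEdges(adjMat):
--   n = len(adjMat)
--   # materialize the graph as an explicit edge list (row-major), reading the matrix once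
--   edges = [(i, j) for i in range(n) for j in range(n) if adjMat[i][j] == 1]
--   # per node, gather from the edge list instead of re-reading the matrix
--   return {i: [[s for (s, t) in edges if t == i],
--               [t for (s, t) in edges if s == i]] for i in range(n)}
-- ===== Notes on version B (the rewrite author's own statement) =====
-- stated objective: alternative
-- what changed: B changes the data structure: it first materializes the graph as an explicit row-major edge list (reading the matrix exactly once) and then builds each node's incoming/outgoing lists by filtering that edge list, whereas A re-scans the matrix per node (row i for outgoing, column i for incoming).
import Mathlib
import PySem

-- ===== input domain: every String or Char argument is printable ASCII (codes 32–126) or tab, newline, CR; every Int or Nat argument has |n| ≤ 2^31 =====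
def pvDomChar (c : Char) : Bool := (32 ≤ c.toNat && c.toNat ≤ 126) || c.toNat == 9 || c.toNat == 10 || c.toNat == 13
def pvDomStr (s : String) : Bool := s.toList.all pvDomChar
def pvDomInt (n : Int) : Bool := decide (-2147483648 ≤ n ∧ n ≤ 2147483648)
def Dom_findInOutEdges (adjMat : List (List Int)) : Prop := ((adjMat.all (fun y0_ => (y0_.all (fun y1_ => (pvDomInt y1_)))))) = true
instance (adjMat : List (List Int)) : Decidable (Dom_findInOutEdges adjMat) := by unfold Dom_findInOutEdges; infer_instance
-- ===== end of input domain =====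

-- B first materializes the graph as an explicit row-major edge list (reading the matrix once)
-- and then builds each node's incoming/outgoing lists by filtering that edge list, instead of
-- A's per-node row+column matrix scans; the return values agree on every matrix whose rows are
-- at least as long as the matrix (elsewhere both Pythons raise IndexError).

-- ===== PORT A =====
-- literal transliteration of A: for each i, gather row i into outgoing and column i into
-- incoming by a joint inner loop, then edgeDict[i] = [incoming, outgoing]; result = dict items

def findInOutEdges (adjMat : List (List Int)) : List (Int × List (List Int)) :=
  let n : Int := adjMat.length
  ((PySem.List.pyRange 0 n 1).foldl
      (fun (d : PySem.Dict Int (List (List Int))) i =>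
        let p := (PySem.List.pyRange 0 n 1).foldl
          (fun (p : List Int × List Int) j =>
            let outgoing := if PySem.List.pyGetD (PySem.List.pyGetD adjMat i []) j 0 = 1 then p.2 ++ [j] else p.2
            let incoming := if PySem.List.pyGetD (PySem.List.pyGetD adjMat j []) i 0 = 1 then p.1 ++ [j] else p.1
            (incoming, outgoing))
          ([], [])
        d.insert i [p.1, p.2])
      PySem.Dict.empty).items

-- ===== PORT B =====
-- literal transliteration of B: the nested list comprehension building the edge list
-- [(i, j) for i in range(n) for j in range(n) if adjMat[i][j] == 1] (flatMap of filtered rows),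
-- then the dict comprehension whose value lists filter the edge list per node
def findInOutEdges_alt (adjMat : List (List Int)) : List (Int × List (List Int)) :=
  let n : Int := adjMat.length
  let edges : List (Int × Int) :=
    (PySem.List.pyRange 0 n 1).flatMap (fun i =>
      ((PySem.List.pyRange 0 n 1).filter
          (fun j => decide (PySem.List.pyGetD (PySem.List.pyGetD adjMat i []) j 0 = 1))).map
        (fun j => (i, j)))
  (PySem.List.pyRange 0 n 1).map (fun i =>
    (i, [(edges.filter (fun p => decide (p.2 = i))).map Prod.fst,
         (edges.filter (fun p => decide (p.1 = i))).map Prod.snd]))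

-- ===== PRECONDITION & SPEC =====
-- Pre_ excludes exactly the ragged matrices having a row shorter than the matrix itself, on
-- which both Pythons raise IndexError.
def Pre_findInOutEdges (adjMat : List (List Int)) : Prop :=
  ∀ row ∈ adjMat, adjMat.length ≤ row.length
instance (adjMat : List (List Int)) : Decidable (Pre_findInOutEdges adjMat) := by
  unfold Pre_findInOutEdges; infer_instance
def pvWitness_findInOutEdges : List (List Int) := [[0, 1, 0], [1, 0, 1], [0, 0, 1]]

def Spec_findInOutEdges (adjMat : List (List Int)) (out : List (Int × List (List Int))) : Prop := out = findInOutEdges_alt adjMat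
instance (adjMat : List (List Int)) (out : List (Int × List (List Int))) : Decidable (Spec_findInOutEdges adjMat out) := by unfold Spec_findInOutEdges; infer_instance

-- ===== CLAIM (what is proved, stated in full; the proofs are below) =====
def Claim_equal_findInOutEdges : Prop := ∀ (adjMat : List (List Int)), Dom_findInOutEdges adjMat → Pre_findInOutEdges adjMat → Spec_findInOutEdges adjMat (findInOutEdges adjMat)

-- ===== LEMMAS AND PROOFS =====

lemma a_inner (adjMat : List (List Int)) (n i : Int) :
    (PySem.List.pyRange 0 n 1).foldl
        (fun (p : List Int × List Int) j =>
          let outgoing := if PySem.List.pyGetD (PySem.List.pyGetD adjMat i []) j 0 = 1 then p.2 ++ [j] else p.2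
          let incoming := if PySem.List.pyGetD (PySem.List.pyGetD adjMat j []) i 0 = 1 then p.1 ++ [j] else p.1
          (incoming, outgoing))
        ([], []) =
      ((PySem.List.pyRange 0 n 1).filter (fun j => decide (PySem.List.pyGetD (PySem.List.pyGetD adjMat j []) i 0 = 1)),
       (PySem.List.pyRange 0 n 1).filter (fun j => decide (PySem.List.pyGetD (PySem.List.pyGetD adjMat i []) j 0 = 1))) := by
  show (PySem.List.pyRange 0 n 1).foldl
      (fun (p : List Int × List Int) j =>
        (if PySem.List.pyGetD (PySem.List.pyGetD adjMat j []) i 0 = 1 then p.1 ++ [j] else p.1,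
         if PySem.List.pyGetD (PySem.List.pyGetD adjMat i []) j 0 = 1 then p.2 ++ [j] else p.2))
      ([], []) = _
  rw [PySem.List.foldl_prod_mk
    (f := fun (l : List Int) j => if PySem.List.pyGetD (PySem.List.pyGetD adjMat j []) i 0 = 1 then l ++ [j] else l)
    (g := fun (l : List Int) j => if PySem.List.pyGetD (PySem.List.pyGetD adjMat i []) j 0 = 1 then l ++ [j] else l)]
  rw [PySem.List.foldl_append_ite_eq_filter, PySem.List.foldl_append_ite_eq_filter]
  simp

-- A's value in closed form: per node i, the two matrix-scan filters
lemma a_char (adjMat : List (List Int)) :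
    findInOutEdges adjMat =
      (PySem.List.pyRange 0 (adjMat.length : Int) 1).map
        (fun i => (i,
          [(PySem.List.pyRange 0 (adjMat.length : Int) 1).filter
              (fun j => decide (PySem.List.pyGetD (PySem.List.pyGetD adjMat j []) i 0 = 1)),
           (PySem.List.pyRange 0 (adjMat.length : Int) 1).filter
              (fun j => decide (PySem.List.pyGetD (PySem.List.pyGetD adjMat i []) j 0 = 1))])) := by
  unfold findInOutEdges
  simp only [a_inner]
  rw [PySem.Dict.items_foldl_insert_fresh _ (fun i => i)
      (fun i => [(PySem.List.pyRange 0 (adjMat.length : Int) 1).filter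
          (fun j => decide (PySem.List.pyGetD (PySem.List.pyGetD adjMat j []) i 0 = 1)),
        (PySem.List.pyRange 0 (adjMat.length : Int) 1).filter
          (fun j => decide (PySem.List.pyGetD (PySem.List.pyGetD adjMat i []) j 0 = 1))])
      PySem.Dict.empty (by intro a _; simp)
      (by simpa using PySem.List.nodup_pyRange_one 0 (adjMat.length : Int))]
  simp [PySem.Dict.empty]

-- filtering a nodup list for one of its members, jointly with a test
lemma filter_eq_self_singleton (R : List Int) (hnd : R.Nodup) (i : Int) (hi : i ∈ R)
    (q : Int → Bool) :
    R.filter (fun j => decide (j = i) && q j) = if q i then [i] else [] := by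
  induction R with
  | nil => cases hi
  | cons a rest ih =>
      rcases List.nodup_cons.mp hnd with ⟨hani, hndr⟩
      by_cases hai : a = i
      · subst hai
        have : rest.filter (fun j => decide (j = a) && q j) = [] := by
          apply List.filter_eq_nil_iff.mpr
          intro j hj
          simp only [Bool.and_eq_true, decide_eq_true_eq]
          rintro ⟨rfl, -⟩; exact hani hj
        by_cases hq : q a = true
        · simp [hq, this]
        · simp [hq, this]
      · have hir : i ∈ rest := by
          rcases List.mem_cons.mp hi with h | h
          · exact absurd h.symm hai
          · exact h
        simp [hai, ih hndr hir]

-- flatMapping blocks selected by key equality over a nodup key list picks out one block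
lemma flatMap_if_eq (R : List Int) (hnd : R.Nodup) (i : Int) (hi : i ∈ R)
    (g : Int → List Int) :
    R.flatMap (fun s => if s = i then g s else []) = g i := by
  induction R with
  | nil => cases hi
  | cons a rest ih =>
      rcases List.nodup_cons.mp hnd with ⟨hani, hndr⟩
      by_cases hai : a = i
      · subst hai
        have : rest.flatMap (fun s => if s = a then g s else []) = [] := by
          apply List.flatMap_eq_nil_iff.mpr
          intro s hs
          rw [if_neg]; rintro rfl; exact hani hs
        simp [List.flatMap_cons, this]
      · have hir : i ∈ rest := by
          rcases List.mem_cons.mp hi with h | h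
          · exact absurd h.symm hai
          · exact h
        simp [List.flatMap_cons, hai, ih hndr hir]

-- turning filter-of-singletons back into a filter
lemma flatMap_ite_singleton (R : List Int) (q : Int → Bool) :
    R.flatMap (fun s => if q s then [s] else []) = R.filter q := by
  induction R with
  | nil => rfl
  | cons a rest ih =>
      by_cases hq : q a = true
      · simp [List.flatMap_cons, hq, ih]
      · simp [List.flatMap_cons, hq, ih]

-- B's incoming list for node i equals A's column scan
lemma b_inc (adjMat : List (List Int)) (i : Int)
    (hi : i ∈ PySem.List.pyRange 0 (adjMat.length : Int) 1) :
    (((PySem.List.pyRange 0 (adjMat.length : Int) 1).flatMap (fun s =>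
        ((PySem.List.pyRange 0 (adjMat.length : Int) 1).filter
            (fun j => decide (PySem.List.pyGetD (PySem.List.pyGetD adjMat s []) j 0 = 1))).map
          (fun j => (s, j)))).filter (fun p => decide (p.2 = i))).map Prod.fst =
      (PySem.List.pyRange 0 (adjMat.length : Int) 1).filter
        (fun j => decide (PySem.List.pyGetD (PySem.List.pyGetD adjMat j []) i 0 = 1)) := by
  have hnd := PySem.List.nodup_pyRange_one 0 (adjMat.length : Int)
  rw [List.filter_flatMap, List.map_flatMap]
  have hblk : ∀ s : Int,
      ((((PySem.List.pyRange 0 (adjMat.length : Int) 1).filter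
            (fun j => decide (PySem.List.pyGetD (PySem.List.pyGetD adjMat s []) j 0 = 1))).map
          (fun j => (s, j))).filter (fun p => decide (p.2 = i))).map Prod.fst =
        if decide (PySem.List.pyGetD (PySem.List.pyGetD adjMat s []) i 0 = 1) then [s] else [] := by
    intro s
    rw [List.filter_map, List.filter_filter]
    simp only [Function.comp]
    rw [filter_eq_self_singleton _ hnd i hi]
    by_cases hc : decide (PySem.List.pyGetD (PySem.List.pyGetD adjMat s []) i 0 = 1) = true
    · simp [hc]
    · simp [hc]
  calc (PySem.List.pyRange 0 (adjMat.length : Int) 1).flatMap (fun s =>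
          ((((PySem.List.pyRange 0 (adjMat.length : Int) 1).filter
              (fun j => decide (PySem.List.pyGetD (PySem.List.pyGetD adjMat s []) j 0 = 1))).map
            (fun j => (s, j))).filter (fun p => decide (p.2 = i))).map Prod.fst)
      = (PySem.List.pyRange 0 (adjMat.length : Int) 1).flatMap (fun s =>
          if decide (PySem.List.pyGetD (PySem.List.pyGetD adjMat s []) i 0 = 1) then [s] else []) := by
        exact List.flatMap_congr (fun s _ => hblk s)
    _ = _ := flatMap_ite_singleton _ _

-- B's outgoing list for node i equals A's row scan
lemma b_out (adjMat : List (List Int)) (i : Int)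
    (hi : i ∈ PySem.List.pyRange 0 (adjMat.length : Int) 1) :
    (((PySem.List.pyRange 0 (adjMat.length : Int) 1).flatMap (fun s =>
        ((PySem.List.pyRange 0 (adjMat.length : Int) 1).filter
            (fun j => decide (PySem.List.pyGetD (PySem.List.pyGetD adjMat s []) j 0 = 1))).map
          (fun j => (s, j)))).filter (fun p => decide (p.1 = i))).map Prod.snd =
      (PySem.List.pyRange 0 (adjMat.length : Int) 1).filter
        (fun j => decide (PySem.List.pyGetD (PySem.List.pyGetD adjMat i []) j 0 = 1)) := by
  have hnd := PySem.List.nodup_pyRange_one 0 (adjMat.length : Int)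
  rw [List.filter_flatMap, List.map_flatMap]
  have hblk : ∀ s : Int,
      ((((PySem.List.pyRange 0 (adjMat.length : Int) 1).filter
            (fun j => decide (PySem.List.pyGetD (PySem.List.pyGetD adjMat s []) j 0 = 1))).map
          (fun j => (s, j))).filter (fun p => decide (p.1 = i))).map Prod.snd =
        if s = i then (PySem.List.pyRange 0 (adjMat.length : Int) 1).filter
            (fun j => decide (PySem.List.pyGetD (PySem.List.pyGetD adjMat s []) j 0 = 1)) else [] := by
    intro s
    rw [List.filter_map]
    by_cases hs : s = i
    · subst hs; simp
    · simp [hs]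
  calc (PySem.List.pyRange 0 (adjMat.length : Int) 1).flatMap (fun s =>
          ((((PySem.List.pyRange 0 (adjMat.length : Int) 1).filter
              (fun j => decide (PySem.List.pyGetD (PySem.List.pyGetD adjMat s []) j 0 = 1))).map
            (fun j => (s, j))).filter (fun p => decide (p.1 = i))).map Prod.snd)
      = (PySem.List.pyRange 0 (adjMat.length : Int) 1).flatMap (fun s =>
          if s = i then (PySem.List.pyRange 0 (adjMat.length : Int) 1).filter
              (fun j => decide (PySem.List.pyGetD (PySem.List.pyGetD adjMat s []) j 0 = 1)) else []) := by
        exact List.flatMap_congr (fun s _ => hblk s)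
    _ = _ := by rw [flatMap_if_eq _ hnd i hi]

theorem main_eq (adjMat : List (List Int)) : findInOutEdges adjMat = findInOutEdges_alt adjMat := by
  rw [a_char]
  unfold findInOutEdges_alt
  simp only []
  apply List.map_congr_left
  intro i hi
  rw [b_inc adjMat i hi, b_out adjMat i hi]

-- ===== VERDICT (by name: the statement is the Claim_ definition above) =====
theorem findInOutEdges_spec : Claim_equal_findInOutEdges := by
  intro adjMat _ _
  unfold Spec_findInOutEdges
  exact main_eq adjMat
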